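-- pv_equiv track=rewrite | github.com/johngarg/feynwrite | feynwrite/utils.py | sort_index_labels
-- ===== SOURCE A (Python) =====
-- from typing import List
-- from collections import defaultdict
--
-- INDICES = {
--     "lorentz": "mu",
--     "colour_fundamental": "c",
--     "colour_adjoint": "C",
--     "colour_6": "X",
--     "spinor": "s",
--     "isospin_fundamental": "i",
--     "isospin_adjoint": "I",
--     "isospin_4": "Q",
--     "generation": "g",
-- }
--
-- def sort_index_labels(index_labels: List[str]) -> List[str]:
--     # Index labels shouldn't start with a "-" ever
--     index_dict = defaultdict(list)
--     for i in index_labels: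
--         if not i:
--             continue
--         index_dict[i[0]].append(i)
--     # Order in SM model file
--     return [
--         *index_dict[INDICES["lorentz"]],
--         *index_dict[INDICES["spinor"]],
--         *index_dict[INDICES["isospin_adjoint"]],
--         *index_dict[INDICES["isospin_fundamental"]],
--         *index_dict[INDICES["generation"]],
--         *index_dict[INDICES["colour_adjoint"]],
--         *index_dict[INDICES["colour_6"]],
--         *index_dict[INDICES["colour_fundamental"]],
--         # FIXME C2224 wants isospin_4 index at the end, so fix this way. If we
--         # introduce a 4-plet with colour, this may break.
--         *index_dict[INDICES["isospin_4"]],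
--     ]
-- ===== SOURCE B (Python) =====
-- RANK = {"s": 0, "I": 1, "i": 2, "g": 3, "C": 4, "X": 5, "c": 6, "Q": 7}
--
-- def sort_index_labels(index_labels):
--     keep = [i for i in index_labels if i and i[0] in RANK]
--     return sorted(keep, key=lambda i: RANK[i[0]])
-- ===== Notes on version B (the rewrite author's own statement) =====
-- stated objective: idiomatic
-- what changed: A buckets labels into a defaultdict keyed by first character and concatenates nine lookups; B filters to the recognised labels and does one stable sort keyed by the rank of the first character (lorentz 'mu' and unknown prefixes are dropped exactly as in A).
import Mathlib
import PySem

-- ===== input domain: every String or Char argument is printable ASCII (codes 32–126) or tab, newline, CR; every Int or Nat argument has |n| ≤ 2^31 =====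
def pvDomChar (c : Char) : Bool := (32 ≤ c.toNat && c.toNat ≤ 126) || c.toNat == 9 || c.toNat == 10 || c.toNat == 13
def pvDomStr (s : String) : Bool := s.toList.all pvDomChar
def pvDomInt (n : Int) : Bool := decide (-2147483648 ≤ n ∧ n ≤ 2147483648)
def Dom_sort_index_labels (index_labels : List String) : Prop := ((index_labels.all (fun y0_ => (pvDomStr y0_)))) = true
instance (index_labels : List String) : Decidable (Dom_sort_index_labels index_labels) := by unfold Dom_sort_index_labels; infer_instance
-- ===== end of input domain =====

-- B replaces A's defaultdict bucketing + nine-way concatenation by a filter of the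
-- recognised labels followed by ONE stable sort keyed on the rank of the first character
-- (objective: idiomatic; same values, including dropping lorentz/unknown prefixes).

-- Python's i[0] (as a 1-character string) for nonempty i; both sources index i[0]
-- only under a nonemptiness guard, where this is exact.
def pyHead (s : String) : String := String.ofList (s.toList.take 1)

-- ===== PORT A =====
-- index_dict[i[0]].append(i) on a defaultdict(list) is Dict.modify with default [].
def sort_index_labels (index_labels : List String) : List String :=
  let d := index_labels.foldl
    (fun d i => if i = "" then d else d.modify (pyHead i) [] (· ++ [i]))
    PySem.Dict.empty
  -- order in SM model file: lorentz ("mu", never a 1-char key), spinor, isospin_adjoint,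
  -- isospin_fundamental, generation, colour_adjoint, colour_6, colour_fundamental, isospin_4
  d.getD "mu" [] ++ (d.getD "s" [] ++ (d.getD "I" [] ++ (d.getD "i" [] ++ (d.getD "g" [] ++
    (d.getD "C" [] ++ (d.getD "X" [] ++ (d.getD "c" [] ++ d.getD "Q" [])))))))

-- ===== PORT B =====
def pvRANK : PySem.Dict String Int :=
  PySem.Dict.mk [("s", 0), ("I", 1), ("i", 2), ("g", 3), ("C", 4), ("X", 5), ("c", 6), ("Q", 7)]

def sort_index_labels_alt (index_labels : List String) : List String :=
  let keep := index_labels.filter (fun i => i ≠ "" && pvRANK.contains (pyHead i))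
  PySem.List.sorted keep (fun i => pvRANK.getD (pyHead i) 0) false

-- ===== PRECONDITION & SPEC =====
def Spec_sort_index_labels (index_labels : List String) (out : List String) : Prop := out = sort_index_labels_alt index_labels
instance (index_labels : List String) (out : List String) : Decidable (Spec_sort_index_labels index_labels out) := by unfold Spec_sort_index_labels; infer_instance

-- ===== CLAIM (what is proved, stated in full; the proofs are below) =====
def Claim_equal_sort_index_labels : Prop := ∀ (index_labels : List String), Dom_sort_index_labels index_labels → Spec_sort_index_labels index_labels (sort_index_labels index_labels)

-- ===== LEMMAS AND PROOFS =====

-- pyHead has length ≤ 1, so it is never the two-character key "mu".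
theorem pyHead_ne_mu (i : String) : (pyHead i = "mu") = False := by
  simp only [eq_iff_iff, iff_false]
  intro h
  have h2 := congrArg String.toList h
  simp only [pyHead, String.toList_ofList] at h2
  have h3 : (i.toList.take 1).length = 2 := by rw [h2]; rfl
  simp [List.length_take] at h3
  omega

-- A's grouping fold, characterised: the bucket at key k holds exactly the nonempty
-- labels whose first character is k, in input order.
theorem foldA_getD (ls : List String) (d : PySem.Dict String (List String)) (k : String) :
    (ls.foldl (fun d i => if i = "" then d else d.modify (pyHead i) [] (· ++ [i])) d).getD k []
      = d.getD k [] ++ ls.filter (fun i => i ≠ "" && pyHead i == k) := by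
  induction ls generalizing d with
  | nil => simp
  | cons i t ih =>
    simp only [List.foldl_cons, List.filter_cons]
    by_cases hi : i = ""
    · subst hi; simpa using ih d
    · rw [ih, if_neg hi, PySem.Dict.getD_modify]
      by_cases hk : k = pyHead i
      · simp [hk, hi]
      · have hbe : (pyHead i == k) = false := by simp [Ne.symm hk]
        simp [hk, hi, hbe]

-- insert x at the end of a prefix none of whose elements come after x …
theorem insertBy_append_not {α : Type} (before : α → α → Bool) (x : α) (l1 l2 : List α)
    (h : ∀ y ∈ l1, before x y = false) :
    PySem.List.insertBy before x (l1 ++ l2) = l1 ++ PySem.List.insertBy before x l2 := by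
  induction l1 with
  | nil => simp
  | cons a t ih =>
    simp only [List.cons_append, PySem.List.insertBy]
    rw [h a (by simp)]
    simp [ih (fun y hy => h y (by simp [hy]))]

-- … and before a suffix all of whose elements come after x.
theorem insertBy_all_before {α : Type} (before : α → α → Bool) (x : α) (l : List α)
    (h : ∀ y ∈ l, before x y = true) :
    PySem.List.insertBy before x l = x :: l := by
  cases l with
  | nil => rfl
  | cons a t => simp [PySem.List.insertBy, h a (by simp)]

-- Stable insertion into a concatenation of buckets with strictly increasing key values:
-- x lands at the end of its own bucket.
theorem insertBy_flatMap {α : Type} (key : α → Int) (x : α) (rs : List Int) (B : Int → List α)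
    (hb : ∀ r ∈ rs, ∀ y ∈ B r, key y = r) (hmem : key x ∈ rs) (hs : rs.Pairwise (· < ·)) :
    PySem.List.insertBy (fun a b => decide (key a < key b)) x (rs.flatMap B)
      = rs.flatMap (fun r => if key x = r then B r ++ [x] else B r) := by
  induction rs with
  | nil => simp at hmem
  | cons r rt ih =>
    simp only [List.flatMap_cons]
    rcases List.pairwise_cons.mp hs with ⟨hlt, hs'⟩
    by_cases hx : key x = r
    · subst hx
      rw [insertBy_append_not _ _ _ _
        (fun y hy => by simp [hb (key x) (by simp) y hy])]
      rw [insertBy_all_before _ _ _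
        (fun y hy => by
          rcases List.mem_flatMap.mp hy with ⟨r', hr', hy'⟩
          simp [hb r' (by simp [hr']) y hy', hlt r' hr'])]
      have hcon : rt.flatMap (fun r' => if key x = r' then B r' ++ [x] else B r') = rt.flatMap B := by
        apply List.flatMap_congr
        intro r' hr'
        have := hlt r' hr'
        rw [if_neg (by omega)]
      rw [hcon, if_pos rfl]
      simp
    · have hmem' : key x ∈ rt := by rcases List.mem_cons.mp hmem with h | h; exact absurd h hx; exact h
      have hgt : r < key x := hlt _ hmem'
      rw [insertBy_append_not _ _ _ _
        (fun y hy => by simp [hb r (by simp) y hy]; omega)]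
      rw [ih (fun r' hr' y hy => hb r' (by simp [hr']) y hy) hmem' hs']
      simp [hx]

-- The stable sort over bucketed keys is the concatenation of the buckets in key order.
theorem sorted_eq_flatMap {α : Type} (xs : List α) (key : α → Int) (rs : List Int)
    (hs : rs.Pairwise (· < ·)) (hmem : ∀ x ∈ xs, key x ∈ rs) :
    PySem.List.sorted xs key false
      = rs.flatMap (fun r => xs.filter (fun x => key x == r)) := by
  induction xs using List.reverseRecOn with
  | nil => simp [PySem.List.sorted]
  | append_singleton t x ih =>
    rw [PySem.List.sorted_eq_foldl_insertBy] at *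
    rw [List.foldl_append]
    simp only [List.foldl_cons, List.foldl_nil]
    rw [ih (fun y hy => hmem y (by simp [hy]))]
    rw [insertBy_flatMap key x rs _ ?_ (hmem x (by simp)) hs]
    · apply List.flatMap_congr
      intro r _
      rw [List.filter_append]
      by_cases hx : key x = r <;> simp [hx]
    · intro r _ y hy
      have := List.of_mem_filter hy
      simpa using this

-- membership/rank bridge: over the literal RANK dict, being a contained key whose rank
-- is r is exactly being the key string paired with r.
theorem rank_bridge (s : String) (r : Int) (k : String)
    (hk : (k, r) ∈ [("s", (0:Int)), ("I", 1), ("i", 2), ("g", 3), ("C", 4), ("X", 5), ("c", 6), ("Q", 7)]) :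
    (pvRANK.contains s && (pvRANK.getD s 0 == r)) = (s == k) := by
  simp only [List.mem_cons, List.not_mem_nil, or_false, Prod.mk.injEq] at hk
  by_cases hs : s ∈ (["s", "I", "i", "g", "C", "X", "c", "Q"] : List String)
  · fin_cases hs <;>
      rcases hk with ⟨rfl, rfl⟩ | ⟨rfl, rfl⟩ | ⟨rfl, rfl⟩ | ⟨rfl, rfl⟩ | ⟨rfl, rfl⟩ | ⟨rfl, rfl⟩ | ⟨rfl, rfl⟩ | ⟨rfl, rfl⟩ <;>
      decide
  · have hks : k ∈ (["s", "I", "i", "g", "C", "X", "c", "Q"] : List String) := by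
      rcases hk with ⟨rfl, _⟩ | ⟨rfl, _⟩ | ⟨rfl, _⟩ | ⟨rfl, _⟩ | ⟨rfl, _⟩ | ⟨rfl, _⟩ | ⟨rfl, _⟩ | ⟨rfl, _⟩ <;> simp
    have hne : (s == k) = false := by
      simp only [beq_eq_false_iff_ne, ne_eq]
      intro he; exact hs (he ▸ hks)
    have hcon : pvRANK.contains s = false := by
      simp only [List.mem_cons, List.not_mem_nil, or_false, not_or] at hs
      simp [pvRANK, PySem.Dict.contains_mk]
      tauto
    simp [hcon, hne]

-- the recognised labels all get a rank in 0..7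
theorem key_mem (s : String) (hc : pvRANK.contains s = true) :
    pvRANK.getD s 0 ∈ ([0, 1, 2, 3, 4, 5, 6, 7] : List Int) := by
  simp only [pvRANK, PySem.Dict.contains_mk] at hc
  simp only [List.any_cons, List.any_nil, Bool.or_eq_true, beq_iff_eq, Bool.false_eq_true,
    or_false] at hc
  rcases hc with rfl | rfl | rfl | rfl | rfl | rfl | rfl | rfl <;> decide

theorem sort_index_labels_eq (ls : List String) :
    sort_index_labels ls = sort_index_labels_alt ls := by
  have hA : ∀ k : String,
      (ls.foldl (fun d i => if i = "" then d else d.modify (pyHead i) [] (· ++ [i]))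
          PySem.Dict.empty).getD k []
        = ls.filter (fun i => i ≠ "" && pyHead i == k) := by
    intro k
    rw [foldA_getD]
    simp [PySem.Dict.getD_empty]
  have hmu : ls.filter (fun i => i ≠ "" && pyHead i == ("mu" : String)) = [] := by
    apply List.filter_eq_nil_iff.mpr
    intro i _
    simp [pyHead_ne_mu i]
  have hB : sort_index_labels_alt ls
      = ([0, 1, 2, 3, 4, 5, 6, 7] : List Int).flatMap
          (fun r => (ls.filter (fun i => i ≠ "" && pvRANK.contains (pyHead i))).filter
            (fun x => pvRANK.getD (pyHead x) 0 == r)) := by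
    unfold sort_index_labels_alt
    apply sorted_eq_flatMap
    · decide
    · intro x hx
      have hx' := List.of_mem_filter hx
      simp only [Bool.and_eq_true] at hx'
      exact key_mem (pyHead x) hx'.2
  have hbucket : ∀ (r : Int) (k : String),
      (k, r) ∈ [("s", (0:Int)), ("I", 1), ("i", 2), ("g", 3), ("C", 4), ("X", 5), ("c", 6), ("Q", 7)] →
      (ls.filter (fun i => i ≠ "" && pvRANK.contains (pyHead i))).filter
          (fun x => pvRANK.getD (pyHead x) 0 == r)
        = ls.filter (fun i => i ≠ "" && pyHead i == k) := by
    intro r k hk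
    rw [List.filter_filter]
    apply List.filter_congr
    intro i _
    rw [← rank_bridge (pyHead i) r k hk]
    cases hd : decide (i ≠ "") <;>
      cases hc : pvRANK.contains (pyHead i) <;>
      simp_all
  unfold sort_index_labels
  rw [hB]
  simp only [List.flatMap_cons, List.flatMap_nil, List.append_nil]
  rw [hbucket 0 "s" (by simp), hbucket 1 "I" (by simp), hbucket 2 "i" (by simp),
    hbucket 3 "g" (by simp), hbucket 4 "C" (by simp), hbucket 5 "X" (by simp),
    hbucket 6 "c" (by simp), hbucket 7 "Q" (by simp)]
  rw [hA "mu", hA "s", hA "I", hA "i", hA "g", hA "C", hA "X", hA "c", hA "Q", hmu]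
  simp

-- ===== VERDICT (by name: the statement is the Claim_ definition above) =====
theorem sort_index_labels_spec : Claim_equal_sort_index_labels := by
  intro ls _
  exact sort_index_labels_eq ls
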